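-- pv_equiv track=rewrite | github.com/unhhyyeexx/ProblemSolving | 백준/Gold/2800. 괄호 제거/괄호 제거.py | solution
-- ===== SOURCE A (Python) =====
-- from itertools import combinations
--
-- def solution(a):
--     # 중복없이
--     answer = set()
--
--     stack = []
--     out = []
--
--     # 반복문으로 괄호의 시작점과 끝점을 순서대로 저장
--     for i, word in enumerate(a):
--         if word == "(":
--             stack.append(i)
--         elif word == ")":
--             out.append((stack.pop(), i))
--
--     for i in range(1, len(out) + 1):
--         # 모든 경우의 수
--         combis = combinations(out, i)
--         # 반복문으로 경우의 수 확인
--         for combi in combis: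
--             tmp = list(a)
--             #괄호 제거
--             for c in combi:
--                 tmp[c[0]] = ""
--                 tmp[c[1]] = ""
--             answer.add(''.join(tmp))
--
--     return sorted(answer)
-- ===== SOURCE B (Python) =====
-- def solution(a):
--     # phase 1 (same as A): pair up parentheses by index
--     stack = []
--     pairs = []
--     for i, word in enumerate(a):
--         if word == "(":
--             stack.append(i)
--         elif word == ")":
--             pairs.append((stack.pop(), i))
--
--     answer = set()
--
--     # phase 2: recursive include/exclude over the pair list instead of
--     # combinations over every subset size
--     def go(k, tmp, removed_any):
--         if k == len(pairs):
--             if removed_any: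
--                 answer.add(''.join(tmp))
--             return
--         # keep pair k
--         go(k + 1, tmp, removed_any)
--         # remove pair k
--         o, c = pairs[k]
--         tmp2 = list(tmp)
--         tmp2[o] = ""
--         tmp2[c] = ""
--         go(k + 1, tmp2, True)
--
--     go(0, list(a), False)
--     return sorted(answer)
-- ===== Notes on version B (the rewrite author's own statement) =====
-- stated objective: alternative
-- what changed: Phase 2's combinations-over-sizes loop (rebuilding tmp from scratch per subset) is replaced by a recursive include/exclude traversal of the pair list that threads the partially-edited character list down the branches, adding a result only when at least one pair was removed.
import Mathlib
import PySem

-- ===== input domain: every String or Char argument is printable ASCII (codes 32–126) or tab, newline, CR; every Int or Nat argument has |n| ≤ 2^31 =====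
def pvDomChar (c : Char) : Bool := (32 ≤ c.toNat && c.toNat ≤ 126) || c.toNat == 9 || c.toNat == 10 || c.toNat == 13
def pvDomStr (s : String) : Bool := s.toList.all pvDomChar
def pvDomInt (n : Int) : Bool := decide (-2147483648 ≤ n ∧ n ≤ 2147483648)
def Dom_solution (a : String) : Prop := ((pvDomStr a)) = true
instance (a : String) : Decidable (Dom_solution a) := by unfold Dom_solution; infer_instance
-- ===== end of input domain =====

-- B replaces the combinations-over-sizes enumeration of pair subsets with a recursive
-- include/exclude traversal of the pair list (alternative decomposition, same cost).

-- ===== PORT A =====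
-- phase 1, IDENTICAL code in Source A and Source B: the stack pass pairing '(' with ')'.
-- none = the IndexError from stack.pop() on an unmatched ')' (excluded by Pre_solution).
def pvScan (a : String) : Option (List Int × List (Int × Int)) :=
  (PySem.List.enumerate a.toList 0).foldl
    (fun st p =>
      match st with
      | none => none
      | some (stack, out) =>
        if p.2 = '(' then some (stack ++ [p.1], out)
        else if p.2 = ')' then
          match PySem.List.pop? stack (-1) with
          | none => none
          | some (j, stack') => some (stack', out ++ [(j, p.1)])
        else some (stack, out))
    (some ([], []))

-- the loop body 'tmp[c[0]] = ""; tmp[c[1]] = ""' (identical in Source A and Source B);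
-- tmp = list(a) is modelled as List (List Char), a one-char string per entry, "" = []
def pvRemovePair (t : List (List Char)) (c : Int × Int) : List (List Char) :=
  PySem.List.pySetD (PySem.List.pySetD t c.1 []) c.2 []

def solution (a : String) : List String :=
  match pvScan a with
  | none => []  -- Source A raises IndexError here (outside Pre_solution)
  | some (_, out) =>
    let answer :=
      (PySem.List.pyRange 1 ((out.length : Int) + 1) 1).foldl
        (fun ans i =>
          (PySem.List.combinations out i.toNat).foldl
            (fun ans combi =>
              let tmp := a.toList.map (fun c => [c])
              let tmp := combi.foldl pvRemovePair tmp
              PySem.Set.add ans (String.ofList tmp.flatten))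
            ans)
        PySem.Set.empty
    PySem.List.sorted answer (fun x => x) false

-- ===== PORT B =====
-- the recursive helper go(k, tmp, removed_any): structural recursion on the pair-list suffix
def pvGo (ps : List (Int × Int)) (tmp : List (List Char)) (removedAny : Bool)
    (ans : PySem.Set String) : PySem.Set String :=
  match ps with
  | [] => if removedAny then PySem.Set.add ans (String.ofList tmp.flatten) else ans
  | p :: rest =>
      let ans' := pvGo rest tmp removedAny ans
      pvGo rest (pvRemovePair tmp p) true ans'

def solution_alt (a : String) : List String :=
  match pvScan a with
  | none => []  -- Source B raises IndexError here too (outside Pre_solution)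
  | some (_, out) =>
    PySem.List.sorted (pvGo out (a.toList.map (fun c => [c])) false PySem.Set.empty)
      (fun x => x) false

-- ===== PRECONDITION & SPEC =====
-- excludes exactly the strings with a prefix holding more ')' than '(' — there the Python
-- (both Source A and Source B) raises IndexError from stack.pop()
def Pre_solution (a : String) : Prop :=
  ∀ n ∈ List.range (a.toList.length + 1),
    (a.toList.take n).count ')' ≤ (a.toList.take n).count '('
instance (a : String) : Decidable (Pre_solution a) := by unfold Pre_solution; infer_instance
def pvWitness_solution : String := "(a)"

def Spec_solution (a : String) (out : List String) : Prop := out = solution_alt a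
instance (a : String) (out : List String) : Decidable (Spec_solution a out) := by unfold Spec_solution; infer_instance

-- ===== CLAIM (what is proved, stated in full; the proofs are below) =====
def Claim_equal_solution : Prop := ∀ (a : String), Dom_solution a → Pre_solution a → Spec_solution a (solution a)

-- ===== LEMMAS AND PROOFS =====

-- membership in A's nested size/combination fold
theorem pv_mem_nested_foldl {α : Type} (f : List (Int × Int) → α) [DecidableEq α]
    (g : Int → List (List (Int × Int))) (l : List Int) (ans0 : PySem.Set α) (x : α) :
    x ∈ l.foldl (fun ans i => (g i).foldl (fun a c => PySem.Set.add a (f c)) ans) ans0 ↔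
      x ∈ ans0 ∨ ∃ i ∈ l, ∃ c ∈ g i, x = f c := by
  induction l generalizing ans0 with
  | nil => simp
  | cons i t ih =>
      simp only [List.foldl_cons, ih, PySem.Set.mem_foldl_add, List.mem_cons]
      constructor
      · rintro (⟨h | ⟨c, hc, rfl⟩⟩ | ⟨j, hj, c, hc, rfl⟩)
        · exact Or.inl h
        · exact Or.inr ⟨i, Or.inl rfl, c, hc, rfl⟩
        · exact Or.inr ⟨j, Or.inr hj, c, hc, rfl⟩
      · rintro (h | ⟨j, (rfl | hj), c, hc, rfl⟩)
        · exact Or.inl (Or.inl h)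
        · exact Or.inl (Or.inr ⟨c, hc, rfl⟩)
        · exact Or.inr ⟨j, hj, c, hc, rfl⟩

theorem pv_nodup_foldl_add {α : Type} [DecidableEq α] (f : List (Int × Int) → α)
    (l : List (List (Int × Int))) (s : PySem.Set α) (h : s.Nodup) :
    (l.foldl (fun a c => PySem.Set.add a (f c)) s).Nodup := by
  induction l generalizing s with
  | nil => exact h
  | cons c t ih => exact ih _ (PySem.Set.nodup_add s (f c) h)

theorem pv_nodup_nested_foldl {α : Type} (f : List (Int × Int) → α) [DecidableEq α]
    (g : Int → List (List (Int × Int))) (l : List Int) (ans0 : PySem.Set α)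
    (h : ans0.Nodup) :
    (l.foldl (fun ans i => (g i).foldl (fun a c => PySem.Set.add a (f c)) ans) ans0).Nodup := by
  induction l generalizing ans0 with
  | nil => exact h
  | cons i t ih =>
      exact ih _ (pv_nodup_foldl_add f (g i) ans0 h)

-- membership in B's recursive include/exclude fold
theorem pv_mem_pvGo (ps : List (Int × Int)) (tmp : List (List Char)) (fl : Bool)
    (ans : PySem.Set String) (x : String) :
    x ∈ pvGo ps tmp fl ans ↔
      x ∈ ans ∨ ∃ s, s.Sublist ps ∧ (fl = true ∨ s ≠ []) ∧
        x = String.ofList ((s.foldl pvRemovePair tmp).flatten) := by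
  induction ps generalizing tmp fl ans with
  | nil =>
      cases fl with
      | false => simp [pvGo]
      | true =>
          rw [show pvGo [] tmp true ans = PySem.Set.add ans (String.ofList tmp.flatten) from rfl,
            PySem.Set.mem_add]
          constructor
          · rintro (h | rfl)
            · exact Or.inl h
            · exact Or.inr ⟨[], List.Sublist.refl _, Or.inl rfl, rfl⟩
          · rintro (h | ⟨s, hs, _, rfl⟩)
            · exact Or.inl h
            · obtain rfl := List.sublist_nil.mp hs
              exact Or.inr rfl
  | cons p rest ih =>
      simp only [pvGo, ih]
      constructor
      · rintro (⟨h | ⟨s, hs, hc, rfl⟩⟩ | ⟨s, hs, _, rfl⟩)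
        · exact Or.inl h
        · exact Or.inr ⟨s, hs.cons _, hc, rfl⟩
        · exact Or.inr ⟨p :: s, hs.cons₂ _, Or.inr (by simp), by simp⟩
      · rintro (h | ⟨s, hs, hc, rfl⟩)
        · exact Or.inl (Or.inl h)
        · rcases List.sublist_cons_iff.mp hs with hs' | ⟨s', rfl, hs'⟩
          · exact Or.inl (Or.inr ⟨s, hs', hc, rfl⟩)
          · exact Or.inr ⟨s', hs', by simp, by simp⟩

theorem pv_nodup_pvGo (ps : List (Int × Int)) (tmp : List (List Char)) (fl : Bool)
    (ans : PySem.Set String) (h : ans.Nodup) : (pvGo ps tmp fl ans).Nodup := by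
  induction ps generalizing tmp fl ans with
  | nil =>
      simp only [pvGo]
      cases fl with
      | false => exact h
      | true => exact PySem.Set.nodup_add _ _ h
  | cons p rest ih => exact ih _ _ _ (ih _ _ _ h)

-- the two answer sets coincide: both hold exactly the renderings of the nonempty sub-lists of out
theorem pv_sets_perm (a : String) (out : List (Int × Int)) :
    ((PySem.List.pyRange 1 ((out.length : Int) + 1) 1).foldl
        (fun ans i =>
          (PySem.List.combinations out i.toNat).foldl
            (fun ans combi =>
              PySem.Set.add ans
                (String.ofList ((combi.foldl pvRemovePair (a.toList.map (fun c => [c]))).flatten)))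
            ans)
        PySem.Set.empty).Perm
      (pvGo out (a.toList.map (fun c => [c])) false PySem.Set.empty) := by
  apply (List.perm_ext_iff_of_nodup ?_ ?_).mpr
  · intro x
    rw [pv_mem_nested_foldl (fun combi =>
          String.ofList ((combi.foldl pvRemovePair (a.toList.map (fun c => [c]))).flatten))
        (fun i => PySem.List.combinations out i.toNat), pv_mem_pvGo]
    simp only [List.not_mem_nil, false_or, PySem.Set.empty, Bool.false_eq_true]
    constructor
    · rintro ⟨i, hi, c, hc, rfl⟩
      rcases (PySem.List.mem_combinations_iff out i.toNat c).mp hc with ⟨hsub, hlen⟩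
      rcases (PySem.List.mem_pyRange_one).mp hi with ⟨h1, _⟩
      refine ⟨c, hsub, ?_, rfl⟩
      intro hnil
      subst hnil
      simp only [List.length_nil] at hlen
      omega
    · rintro ⟨s, hs, hne, rfl⟩
      refine ⟨(s.length : Int), ?_, s, ?_, rfl⟩
      · rw [PySem.List.mem_pyRange_one]
        have h1 : 1 ≤ s.length := List.length_pos_of_ne_nil hne
        have h2 : s.length ≤ out.length := hs.length_le
        omega
      · rw [PySem.List.mem_combinations_iff]
        exact ⟨hs, by simp⟩
  · exact pv_nodup_nested_foldl _ _ _ _ List.nodup_nil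
  · exact pv_nodup_pvGo _ _ _ _ List.nodup_nil

theorem pv_solution_eq (a : String) : solution a = solution_alt a := by
  unfold solution solution_alt
  cases h : pvScan a with
  | none => rfl
  | some st =>
      obtain ⟨stack, out⟩ := st
      exact PySem.List.sorted_eq_sorted_of_perm _ _ _ Function.injective_id (pv_sets_perm a out)

-- ===== VERDICT (by name: the statement is the Claim_ definition above) =====
theorem solution_spec : Claim_equal_solution := by
  intro a _ _
  unfold Spec_solution
  exact pv_solution_eq a
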